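-- pv_equiv track=rewrite | github.com/zointblackbriar/XReview | TokenizeSentiment.py | get_synonym
-- ===== SOURCE A (Python) =====
-- def get_synonym(word):
--     synonyms = [["camera","video", "display"],
--                 ["phone", "cellphone", "smartphone", "phones"],
--                ["setting", "settings"],
--                ["feature", "features"],
--                ["pictures", "photos"],
--                ["speakers", "speaker"]]
--     synonyms_parent = ["camera", "phone", "settings", "features", "photos", "speakers"]
--
--     for i in range(len(synonyms)):
--         if word in synonyms[i]:
--             return synonyms_parent[i]
--
--     return word
-- ===== SOURCE B (Python) =====
-- # Sorted flat (synonym, parent) table + hand-written binary search (O(log n) vs A's linear scan over groups).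
-- _TABLE = [("camera", "camera"), ("cellphone", "phone"), ("display", "camera"),
--           ("feature", "features"), ("features", "features"), ("phone", "phone"),
--           ("phones", "phone"), ("photos", "photos"), ("pictures", "photos"),
--           ("setting", "settings"), ("settings", "settings"), ("smartphone", "phone"),
--           ("speaker", "speakers"), ("speakers", "speakers"), ("video", "camera")]
--
-- def get_synonym(word):
--     lo, hi = 0, len(_TABLE)
--     while lo < hi:
--         mid = (lo + hi) // 2
--         key, parent = _TABLE[mid]
--         if key < word:
--             lo = mid + 1
--         elif word < key:
--             hi = mid
--         else:
--             return parent
--     return word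
-- ===== Notes on version B (the rewrite author's own statement) =====
-- stated objective: alternative
-- what changed: Replaces A's loop over parallel synonym-group lists with per-group membership scans by a single lexicographically sorted flat (synonym, parent) table searched with a hand-written binary search; unmatched words fall through to the word itself.
import Mathlib
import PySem

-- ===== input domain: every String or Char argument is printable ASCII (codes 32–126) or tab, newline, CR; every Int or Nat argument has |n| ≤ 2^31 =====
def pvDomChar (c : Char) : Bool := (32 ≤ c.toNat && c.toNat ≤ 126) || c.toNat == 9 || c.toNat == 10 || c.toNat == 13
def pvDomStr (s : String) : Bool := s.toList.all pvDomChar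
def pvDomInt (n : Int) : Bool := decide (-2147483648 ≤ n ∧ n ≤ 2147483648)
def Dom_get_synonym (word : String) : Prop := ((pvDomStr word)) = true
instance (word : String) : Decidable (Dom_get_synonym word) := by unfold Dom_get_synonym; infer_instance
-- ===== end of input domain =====

-- ===== PORT A =====
-- B replaces A's loop over parallel synonym-group lists (membership scan per group) by a
-- sorted flat (synonym, parent) table searched with a hand-written binary search (alternative).
def synonymsA : List (List String) :=
  [["camera","video","display"],
   ["phone","cellphone","smartphone","phones"],
   ["setting","settings"],
   ["feature","features"],
   ["pictures","photos"],
   ["speakers","speaker"]]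

def synonymsParentA : List String :=
  ["camera","phone","settings","features","photos","speakers"]

-- the for-loop over range(len(synonyms)) with an early return
def goA (word : String) : List Int → String
  | [] => word
  | i :: rest =>
      if (PySem.List.pyGetD synonymsA i []).contains word then
        PySem.List.pyGetD synonymsParentA i ""
      else goA word rest

def get_synonym (word : String) : String :=
  goA word (PySem.List.pyRange 0 ((synonymsA.length : Int)) 1)

-- ===== PORT B =====
-- Python's '<' on strings, ported by hand: lexicographic comparison of the code-point
-- sequences (exact for all strings, not only the ASCII domain).
def lexLt : List Char → List Char → Bool
  | _, [] => false
  | [], _ :: _ => true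
  | a :: as, b :: bs => if a < b then true else if b < a then false else lexLt as bs

def strLt (a b : String) : Bool := lexLt a.toList b.toList

-- sorted flat table and binary search, as in Source B; the fuel argument (= table length)
-- only bounds the loop for totality — the search always terminates well before it runs out.
def tableB : List (String × String) :=
  [("camera","camera"), ("cellphone","phone"), ("display","camera"),
   ("feature","features"), ("features","features"), ("phone","phone"),
   ("phones","phone"), ("photos","photos"), ("pictures","photos"),
   ("setting","settings"), ("settings","settings"), ("smartphone","phone"),
   ("speaker","speakers"), ("speakers","speakers"), ("video","camera")]

def bsearchB (word : String) : Nat → Nat → Nat → String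
  | 0, _, _ => word
  | fuel + 1, lo, hi =>
      if lo < hi then
        let mid := (lo + hi) / 2
        let kp := tableB.getD mid ("", "")
        if strLt kp.1 word then bsearchB word fuel (mid + 1) hi
        else if strLt word kp.1 then bsearchB word fuel lo mid
        else kp.2
      else word

def get_synonym_alt (word : String) : String :=
  bsearchB word tableB.length 0 tableB.length

-- ===== PRECONDITION & SPEC =====
def Spec_get_synonym (word : String) (out : String) : Prop := out = get_synonym_alt word
instance (word : String) (out : String) : Decidable (Spec_get_synonym word out) := by unfold Spec_get_synonym; infer_instance

-- ===== CLAIM (what is proved, stated in full; the proofs are below) =====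
def Claim_equal_get_synonym : Prop := ∀ (word : String), Dom_get_synonym word → Spec_get_synonym word (get_synonym word)

-- ===== LEMMAS AND PROOFS =====

-- two strings neither of which is lexicographically below the other are equal
theorem lexLt_antisymm (as : List Char) : ∀ bs, lexLt as bs = false → lexLt bs as = false → as = bs := by
  induction as with
  | nil =>
      intro bs h1 _
      cases bs with
      | nil => rfl
      | cons b bs => simp [lexLt] at h1
  | cons a as ih =>
      intro bs h1 h2
      cases bs with
      | nil => simp [lexLt] at h2
      | cons b bs =>
        by_cases hab : a < b
        · simp [lexLt, hab] at h1
        · by_cases hba : b < a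
          · simp [lexLt, hba] at h2
          · have hEq : a = b := le_antisymm (not_lt.1 hba) (not_lt.1 hab)
            subst hEq
            simp [lexLt, lt_self_iff_false] at h1 h2
            rw [ih bs h1 h2]

theorem strLt_eq (a b : String) (h1 : strLt a b = false) (h2 : strLt b a = false) : a = b :=
  String.toList_inj.mp (lexLt_antisymm a.toList b.toList h1 h2)


-- if word is none of the table keys, the A-side loop falls through and returns word
theorem goA_miss (word : String)
    (h0 : word ≠ "camera") (h1 : word ≠ "video") (h2 : word ≠ "display")
    (h3 : word ≠ "phone") (h4 : word ≠ "cellphone") (h5 : word ≠ "smartphone")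
    (h6 : word ≠ "phones") (h7 : word ≠ "setting") (h8 : word ≠ "settings")
    (h9 : word ≠ "feature") (h10 : word ≠ "features") (h11 : word ≠ "pictures")
    (h12 : word ≠ "photos") (h13 : word ≠ "speakers") (h14 : word ≠ "speaker") :
    get_synonym word = word := by
  have hr : PySem.List.pyRange 0 ((synonymsA.length : Int)) 1 = [0, 1, 2, 3, 4, 5] := by decide
  unfold get_synonym
  rw [hr]
  simp [goA, synonymsA, PySem.List.pyGetD, PySem.List.pyGet?, PySem.List.pyIdx?,
    h0, h1, h2, h3, h4, h5, h6, h7, h8, h9, h10, h11, h12, h13, h14]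

-- a word that matches no key of the table falls all the way through the binary search
theorem bsearchB_miss_gen (word : String)
    (hkeys : ∀ kp ∈ tableB, word ≠ kp.1) :
    ∀ fuel lo hi, hi ≤ tableB.length → bsearchB word fuel lo hi = word := by
  intro fuel
  induction fuel with
  | zero => intro lo hi _; rfl
  | succ n ih =>
      intro lo hi hhi
      simp only [bsearchB]
      by_cases hlh : lo < hi
      · simp only [if_pos hlh]
        have hmidlt : (lo + hi) / 2 < hi := by omega
        have hmid : (lo + hi) / 2 < tableB.length := lt_of_lt_of_le hmidlt hhi
        have hget : tableB.getD ((lo + hi) / 2) ("", "") ∈ tableB := by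
          unfold List.getD
          rw [List.getElem?_eq_getElem hmid]
          exact List.getElem_mem hmid
        by_cases c1 : strLt (tableB.getD ((lo + hi) / 2) ("", "")).1 word
        · simp only [if_pos c1]; exact ih _ _ hhi
        · simp only [if_neg c1]
          by_cases c2 : strLt word (tableB.getD ((lo + hi) / 2) ("", "")).1
          · simp only [if_pos c2]; exact ih _ _ (le_of_lt hmid)
          · have c1' : strLt (tableB.getD ((lo + hi) / 2) ("", "")).1 word = false := by
              simpa using c1
            have c2' : strLt word (tableB.getD ((lo + hi) / 2) ("", "")).1 = false := by
              simpa using c2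
            exact absurd (strLt_eq _ _ c1' c2').symm (hkeys _ hget)
      · simp only [if_neg hlh]

-- if word is none of the table keys, the binary search returns word
theorem bsearchB_miss (word : String)
    (h0 : word ≠ "camera") (h1 : word ≠ "video") (h2 : word ≠ "display")
    (h3 : word ≠ "phone") (h4 : word ≠ "cellphone") (h5 : word ≠ "smartphone")
    (h6 : word ≠ "phones") (h7 : word ≠ "setting") (h8 : word ≠ "settings")
    (h9 : word ≠ "feature") (h10 : word ≠ "features") (h11 : word ≠ "pictures")
    (h12 : word ≠ "photos") (h13 : word ≠ "speakers") (h14 : word ≠ "speaker") :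
    get_synonym_alt word = word := by
  unfold get_synonym_alt
  apply bsearchB_miss_gen word _ _ _ _ le_rfl
  intro kp hmem
  simp only [tableB, List.mem_cons, List.not_mem_nil, or_false] at hmem
  rcases hmem with rfl|rfl|rfl|rfl|rfl|rfl|rfl|rfl|rfl|rfl|rfl|rfl|rfl|rfl|rfl <;> assumption

-- ===== VERDICT (by name: the statement is the Claim_ definition above) =====
theorem get_synonym_spec : Claim_equal_get_synonym := by
  intro word _
  unfold Spec_get_synonym
  by_cases h0 : word = "camera"
  · subst h0; decide
  by_cases h1 : word = "video"
  · subst h1; decide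
  by_cases h2 : word = "display"
  · subst h2; decide
  by_cases h3 : word = "phone"
  · subst h3; decide
  by_cases h4 : word = "cellphone"
  · subst h4; decide
  by_cases h5 : word = "smartphone"
  · subst h5; decide
  by_cases h6 : word = "phones"
  · subst h6; decide
  by_cases h7 : word = "setting"
  · subst h7; decide
  by_cases h8 : word = "settings"
  · subst h8; decide
  by_cases h9 : word = "feature"
  · subst h9; decide
  by_cases h10 : word = "features"
  · subst h10; decide
  by_cases h11 : word = "pictures"
  · subst h11; decide
  by_cases h12 : word = "photos"
  · subst h12; decide
  by_cases h13 : word = "speakers"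
  · subst h13; decide
  by_cases h14 : word = "speaker"
  · subst h14; decide
  rw [goA_miss word h0 h1 h2 h3 h4 h5 h6 h7 h8 h9 h10 h11 h12 h13 h14,
     bsearchB_miss word h0 h1 h2 h3 h4 h5 h6 h7 h8 h9 h10 h11 h12 h13 h14]
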